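-- pv_equiv track=rewrite | github.com/VectorOps/codeng | src/vocode/input_manager.py | ordered_input_types
-- ===== SOURCE A (Python) =====
-- from typing import Deque, Dict, Iterable, Optional
--
-- INPUT_TYPE_INTERACTIVE = "interactive"
--
-- INPUT_TYPE_HTTP = "http"
--
-- def normalize_input_type(input_type: Optional[str]) -> str:
--     if input_type is None:
--         return INPUT_TYPE_INTERACTIVE
--     normalized = input_type.strip()
--     if not normalized:
--         return INPUT_TYPE_INTERACTIVE
--     return normalized
--
-- def ordered_input_types(input_types: Iterable[str]) -> list[str]:
--     unique_types = {normalize_input_type(input_type) for input_type in input_types}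
--     ordered: list[str] = []
--     for input_type in (INPUT_TYPE_INTERACTIVE, INPUT_TYPE_HTTP):
--         if input_type in unique_types:
--             ordered.append(input_type)
--             unique_types.remove(input_type)
--     ordered.extend(sorted(unique_types))
--     return ordered
-- ===== SOURCE B (Python) =====
-- from typing import Optional
--
-- INPUT_TYPE_INTERACTIVE = "interactive"
--
-- INPUT_TYPE_HTTP = "http"
--
-- def normalize_input_type(input_type: Optional[str]) -> str:
--     if input_type is None:
--         return INPUT_TYPE_INTERACTIVE
--     normalized = input_type.strip()
--     if not normalized:
--         return INPUT_TYPE_INTERACTIVE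
--     return normalized
--
-- def _rank_key(t: str) -> str:
--     if t == INPUT_TYPE_INTERACTIVE:
--         return "0"
--     if t == INPUT_TYPE_HTTP:
--         return "1"
--     return "2" + t
--
-- def ordered_input_types(input_types):
--     return sorted({normalize_input_type(t) for t in input_types}, key=_rank_key)
-- ===== Notes on version B (the rewrite author's own statement) =====
-- stated objective: simpler
-- what changed: Replaces A's explicit priority partition (append interactive/http via a loop with set removal, then extend with a separately sorted remainder) by a single sorted() call over the normalized set with a rank-prefix key that orders interactive first, http second, the rest alphabetically.
import Mathlib
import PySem

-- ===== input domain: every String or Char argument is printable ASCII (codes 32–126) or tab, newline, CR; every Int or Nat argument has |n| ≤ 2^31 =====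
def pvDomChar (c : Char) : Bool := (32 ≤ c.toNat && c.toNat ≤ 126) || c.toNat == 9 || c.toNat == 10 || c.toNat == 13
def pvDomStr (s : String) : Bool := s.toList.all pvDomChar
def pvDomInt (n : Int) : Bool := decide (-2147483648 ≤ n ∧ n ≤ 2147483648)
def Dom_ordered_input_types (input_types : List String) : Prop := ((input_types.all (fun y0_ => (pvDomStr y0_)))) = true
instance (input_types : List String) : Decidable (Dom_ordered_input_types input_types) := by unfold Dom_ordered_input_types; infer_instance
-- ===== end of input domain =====

-- B replaces A's explicit priority loop + separate sort of the remainder by ONE sort of the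
-- normalized set under a compound rank key; same output, similar cost (objective: simpler).

-- ===== PORT A =====
-- normalize_input_type: the None branch is unreachable here (inputs are List String)
def pvNormalize (input_type : String) : String :=
  let normalized := PySem.Str.strip input_type
  if normalized = "" then "interactive" else normalized

-- 'unique_types.remove(t)' runs only after 'if t in unique_types', where it equals discard (no KeyError)
def ordered_input_types (input_types : List String) : List String :=
  let unique_types : PySem.Set String := PySem.Set.ofList (input_types.map pvNormalize)
  let st := ["interactive", "http"].foldl
      (fun (st : List String × PySem.Set String) t =>
        if PySem.Set.contains st.2 t then (st.1 ++ [t], PySem.Set.discard st.2 t) else st)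
      ([], unique_types)
  st.1 ++ PySem.List.sorted st.2 (fun x => x) false

-- ===== PORT B =====
def pvRankKey (t : String) : String :=
  if t = "interactive" then "0" else if t = "http" then "1" else "2" ++ t

def ordered_input_types_alt (input_types : List String) : List String :=
  PySem.List.sorted (PySem.Set.ofList (input_types.map pvNormalize)) pvRankKey false

-- ===== PRECONDITION & SPEC =====
def Spec_ordered_input_types (input_types : List String) (out : List String) : Prop := out = ordered_input_types_alt input_types
instance (input_types : List String) (out : List String) : Decidable (Spec_ordered_input_types input_types out) := by unfold Spec_ordered_input_types; infer_instance

-- ===== CLAIM (what is proved, stated in full; the proofs are below) =====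
def Claim_equal_ordered_input_types : Prop := ∀ (input_types : List String), Dom_ordered_input_types input_types → Spec_ordered_input_types input_types (ordered_input_types input_types)

-- ===== LEMMAS AND PROOFS =====

lemma pv_discard_not_mem {s : List String} {x : String} (h : x ∉ s) :
    PySem.Set.discard s x = s := by
  unfold PySem.Set.discard
  refine List.filter_eq_self.mpr (fun y hy => ?_)
  exact bne_iff_ne.mpr (by rintro rfl; exact h hy)

-- the common "partitioned" shape both ports reduce to
def pvShape (s : List String) : List String :=
  (if "interactive" ∈ s then ["interactive"] else []) ++
  (if "http" ∈ s then ["http"] else []) ++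
  PySem.List.sorted (PySem.Set.discard (PySem.Set.discard s "interactive") "http") (fun x => x) false

lemma pv_A_eq_shape (input_types : List String) :
    ordered_input_types input_types =
      pvShape (PySem.Set.ofList (input_types.map pvNormalize)) := by
  unfold ordered_input_types pvShape
  set s := PySem.Set.ofList (input_types.map pvNormalize) with hs
  simp only [List.foldl_cons, List.foldl_nil]
  by_cases hi : "interactive" ∈ s <;> by_cases hh : "http" ∈ s <;>
    simp [PySem.Set.mem_discard, hi, hh, pv_discard_not_mem]

lemma pv_rank_interactive : pvRankKey "interactive" = "0" := rfl
lemma pv_rank_http : pvRankKey "http" = "1" := by decide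
lemma pv_rank_other {x : String} (hi : x ≠ "interactive") (hh : x ≠ "http") :
    pvRankKey x = "2" ++ x := by
  unfold pvRankKey; rw [if_neg hi, if_neg hh]

lemma pv_zero_lt (x : String) : "0" < "2" ++ x := by
  rw [String.lt_iff_toList_lt]
  simp only [String.toList_append, String.reduceToList, List.cons_append, List.nil_append]
  exact List.cons_lt_cons_iff.mpr (Or.inl (by decide))

lemma pv_one_lt (x : String) : "1" < "2" ++ x := by
  rw [String.lt_iff_toList_lt]
  simp only [String.toList_append, String.reduceToList, List.cons_append, List.nil_append]
  exact List.cons_lt_cons_iff.mpr (Or.inl (by decide))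

lemma pv_rank_mono {a b : String} (hai : a ≠ "interactive") (hah : a ≠ "http")
    (hbi : b ≠ "interactive") (hbh : b ≠ "http") (h : a < b) :
    pvRankKey a < pvRankKey b := by
  rw [pv_rank_other hai hah, pv_rank_other hbi hbh]
  rw [String.lt_iff_toList_lt] at *
  simp only [String.toList_append, String.reduceToList, List.cons_append, List.nil_append]
  exact List.cons_lt_cons_self.mpr h

lemma pv_B_eq_shape (s : List String) (hs : s.Nodup) :
    PySem.List.sorted s pvRankKey false = pvShape s := by
  set d := PySem.Set.discard (PySem.Set.discard s "interactive") "http" with hd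
  set t := PySem.List.sorted d (fun x => x) false with ht
  have hmem_t : ∀ x, x ∈ t ↔ x ∈ s ∧ x ≠ "interactive" ∧ x ≠ "http" := by
    intro x
    simp [ht, hd, PySem.List.mem_sorted, PySem.Set.mem_discard, and_assoc]
  have hd_nodup : d.Nodup := PySem.Set.nodup_discard _ _ (PySem.Set.nodup_discard _ _ hs)
  have ht_nodup : t.Nodup := ((PySem.List.sorted_perm d (fun x => x) false).nodup_iff).mpr hd_nodup
  have ht_le : t.Pairwise (fun a b => a ≤ b) := PySem.List.sorted_pairwise d (fun x => x)
  have ht_lt : t.Pairwise (fun a b => a < b) :=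
    (ht_le.and ht_nodup).imp (fun h => lt_of_le_of_ne h.1 h.2)
  have ht_rank : t.Pairwise (fun a b => pvRankKey a < pvRankKey b) := by
    refine List.Pairwise.imp_of_mem ?_ ht_lt
    intro a b ha hb hab
    obtain ⟨-, hai, hah⟩ := (hmem_t a).mp ha
    obtain ⟨-, hbi, hbh⟩ := (hmem_t b).mp hb
    exact pv_rank_mono hai hah hbi hbh hab
  have hmem_ite : ∀ (c : Prop) [Decidable c] (v x : String),
      x ∈ (if c then [v] else []) ↔ c ∧ x = v := by
    intro c _ v x; split_ifs with h <;> simp [h]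
  have hIb : ∀ b ∈ t, pvRankKey "interactive" < pvRankKey b := by
    intro b hb
    obtain ⟨-, hbi, hbh⟩ := (hmem_t b).mp hb
    rw [pv_rank_interactive, pv_rank_other hbi hbh]
    exact pv_zero_lt b
  have hHb : ∀ b ∈ t, pvRankKey "http" < pvRankKey b := by
    intro b hb
    obtain ⟨-, hbi, hbh⟩ := (hmem_t b).mp hb
    rw [pv_rank_http, pv_rank_other hbi hbh]
    exact pv_one_lt b
  -- Pairwise of the shape under pvRankKey
  have hpair : (pvShape s).Pairwise (fun a b => pvRankKey a < pvRankKey b) := by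
    unfold pvShape
    rw [← hd, ← ht]
    split_ifs with hi hh hh <;>
      simp only [List.cons_append, List.nil_append, List.pairwise_cons]
    · refine ⟨?_, hHb, ht_rank⟩
      intro b hb
      rcases List.mem_cons.mp hb with rfl | hb
      · rw [pv_rank_interactive, pv_rank_http, String.lt_iff_toList_lt]
        decide
      · exact hIb b hb
    · exact ⟨hIb, ht_rank⟩
    · exact ⟨hHb, ht_rank⟩
    · exact ht_rank
  have hnodup : (pvShape s).Nodup :=
    hpair.imp (fun h => by rintro rfl; exact lt_irrefl _ h)
  have hperm : (pvShape s).Perm s := by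
    rw [List.perm_ext_iff_of_nodup hnodup hs]
    intro x
    unfold pvShape
    rw [← hd, ← ht]
    simp only [List.mem_append, hmem_ite, hmem_t]
    by_cases hxi : x = "interactive" <;> by_cases hxh : x = "http" <;>
      subst_vars <;> simp_all
  exact PySem.List.sorted_eq_of_perm_of_pairwise_lt s (pvShape s) pvRankKey hperm hpair

-- ===== VERDICT (by name: the statement is the Claim_ definition above) =====
theorem ordered_input_types_spec : Claim_equal_ordered_input_types := by
  intro input_types _
  unfold Spec_ordered_input_types ordered_input_types_alt
  rw [pv_A_eq_shape, pv_B_eq_shape _ (PySem.Set.nodup_ofList _)]
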